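-- pv_equiv track=rewrite | github.com/BHliuyu/copula | py/JDData_preprocessing.py | merge_news
-- ===== SOURCE A (Python) =====
-- def merge_news(standard_date, text):
--     news_detail = {}
--     date = []
--     article = []
--     date.append(standard_date[0])
--     article.append(text[0])
--     for i in range(1, len(standard_date)):
--         if standard_date[i] == date[-1]:
--             article[-1] = article[-1] + text[i]
--         else:
--             date.append(standard_date[i])
--             article.append(text[i])
--     news_detail['date'] = date
--     news_detail['article'] = article
--     return news_detail
-- ===== SOURCE B (Python) =====
-- def merge_news(standard_date, text):
--     # Run-based grouping: for each maximal run of equal consecutive dates,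
--     # accumulate the corresponding texts into one chunk.
--     date = []
--     article = []
--     n = len(standard_date)
--     i = 0
--     while i < n:
--         d = standard_date[i]
--         chunk = text[i]
--         j = i + 1
--         while j < n and standard_date[j] == d:
--             chunk = chunk + text[j]
--             j += 1
--         date.append(d)
--         article.append(chunk)
--         i = j
--     return {'date': date, 'article': article}
-- ===== Notes on version B (the rewrite author's own statement) =====
-- stated objective: alternative
-- what changed: A appends the first element of each group and then keeps mutating the last list entry (article[-1] += text[i]) while scanning linearly; B is a run-based two-level loop: an inner while finds each maximal run of equal consecutive dates and accumulates its texts into one chunk before a single append per group.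
import Mathlib
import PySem

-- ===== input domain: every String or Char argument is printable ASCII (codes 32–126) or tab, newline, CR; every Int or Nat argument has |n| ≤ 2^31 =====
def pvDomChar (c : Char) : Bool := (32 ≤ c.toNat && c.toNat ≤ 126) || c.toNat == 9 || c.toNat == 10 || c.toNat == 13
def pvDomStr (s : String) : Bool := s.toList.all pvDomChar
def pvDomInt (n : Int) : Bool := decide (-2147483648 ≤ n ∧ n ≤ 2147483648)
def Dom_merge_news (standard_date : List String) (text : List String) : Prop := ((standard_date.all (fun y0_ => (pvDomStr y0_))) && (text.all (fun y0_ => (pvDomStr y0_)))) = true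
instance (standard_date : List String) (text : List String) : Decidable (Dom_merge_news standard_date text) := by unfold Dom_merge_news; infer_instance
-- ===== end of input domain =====

-- B replaces A's "extend the last appended entry" scan by a run-based two-level loop
-- (inner while per maximal run of equal dates); same cost, different decomposition.
-- ===== PORT A =====
-- the body of A's for-loop (i runs over range(1, len(standard_date))); state = (date, article)
def mergeStepA (sd : List String) (text : List String)
    (st : Option (List String × List String)) (i : Int) : Option (List String × List String) :=
  match st with
  | none => none
  | some (date, article) =>
    match PySem.List.pyGet? sd i, PySem.List.pyGet? text i with
    | some si, some t =>
      -- date[-1] / article[-1]: both lists are nonempty at every use, so .getD "" is unreachable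
      if si = date.getLast?.getD "" then
        some (date, article.dropLast ++ [(article.getLast?.getD "") ++ t])
      else
        some (date ++ [si], article ++ [t])
    | _, _ => none            -- IndexError on text[i] (sd[i] is always in range here)

def merge_news (standard_date : List String) (text : List String) : List (String × List String) :=
  match PySem.List.pyGet? standard_date 0 with
  | none => []                -- IndexError on standard_date[0]
  | some d0 =>
    match PySem.List.pyGet? text 0 with
    | none => []              -- IndexError on text[0]
    | some t0 =>
      match (PySem.List.pyRange 1 (standard_date.length : Int)).foldl
          (mergeStepA standard_date text) (some ([d0], [t0])) with
      | none => []            -- IndexError inside the loop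
      | some (date, article) => [("date", date), ("article", article)]

-- ===== PORT B =====
-- B's inner while: accumulate the texts of the run of dates equal to d, starting at index j.
-- The Nat fuel only makes the while-loop total: every call passes fuel ≥ sd.length - j,
-- so the fuel-0 exit coincides with the loop's normal exit (j ≥ sd.length).
def mergeRunB (sd : List String) (text : List String) (d : String) :
    Nat → String → Nat → Option (String × Nat)
  | 0, chunk, j => some (chunk, j)
  | fuel + 1, chunk, j =>
    if h : j < sd.length then
      if sd[j] = d then
        match PySem.List.pyGet? text (j : Int) with
        | none => none        -- IndexError on text[j]
        | some t => mergeRunB sd text d fuel (chunk ++ t) (j + 1)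
      else some (chunk, j)
    else some (chunk, j)

-- B's outer while: one (date, chunk) pair appended per maximal run. Fuel as above:
-- i advances by at least 1 per iteration, so fuel = sd.length suffices from i = 0.
def mergeLoopB (sd : List String) (text : List String) :
    Nat → Nat → List String → List String → Option (List String × List String)
  | 0, _, date, article => some (date, article)
  | fuel + 1, i, date, article =>
    if h : i < sd.length then
      match PySem.List.pyGet? text (i : Int) with
      | none => none          -- IndexError on text[i]
      | some t0 =>
        match mergeRunB sd text sd[i] sd.length t0 (i + 1) with
        | none => none
        | some (chunk, j) => mergeLoopB sd text fuel j (date ++ [sd[i]]) (article ++ [chunk])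
    else some (date, article)

def merge_news_alt (standard_date : List String) (text : List String) : List (String × List String) :=
  match mergeLoopB standard_date text standard_date.length 0 [] [] with
  | none => []                -- IndexError inside the loops
  | some (date, article) => [("date", date), ("article", article)]

-- ===== PRECONDITION & SPEC =====
-- Pre_ excludes exactly the inputs on which A raises IndexError: empty standard_date
-- (standard_date[0]) or a text shorter than standard_date (text[i]).
def Pre_merge_news (standard_date : List String) (text : List String) : Prop :=
  standard_date ≠ [] ∧ standard_date.length ≤ text.length
instance (standard_date : List String) (text : List String) : Decidable (Pre_merge_news standard_date text) := by unfold Pre_merge_news; infer_instance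

def pvWitness_merge_news : List String × List String :=
  (["a", "a", "b"], ["x", "y", "z"])

def Spec_merge_news (standard_date : List String) (text : List String) (out : List (String × List String)) : Prop := out = merge_news_alt standard_date text
instance (standard_date : List String) (text : List String) (out : List (String × List String)) : Decidable (Spec_merge_news standard_date text out) := by unfold Spec_merge_news; infer_instance

-- ===== CLAIM (what is proved, stated in full; the proofs are below) =====
def Claim_equal_merge_news : Prop := ∀ (standard_date : List String) (text : List String), Dom_merge_news standard_date text → Pre_merge_news standard_date text → Spec_merge_news standard_date text (merge_news standard_date text)

-- ===== LEMMAS AND PROOFS =====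

theorem getLastD_concat {α : Type} (l : List α) (a d : α) :
    ((l ++ [a]).getLast?.getD d) = a := by
  simp

-- the key correspondence: A's remaining fold on state (dInit ++ [d], aInit ++ [a]) equals
-- B's run accumulation starting from (d, a) at index i followed by B's outer loop
theorem loopA_eq_loopB (sd text : List String) (hlen : sd.length ≤ text.length) :
    ∀ (N i : Nat), sd.length - i ≤ N →
      ∀ (fI fO : Nat), sd.length - i ≤ fI → sd.length - i ≤ fO →
      ∀ (d a : String) (dInit aInit : List String),
      (PySem.List.pyRange (i : Int) (sd.length : Int)).foldl (mergeStepA sd text)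
          (some (dInit ++ [d], aInit ++ [a])) =
        (match mergeRunB sd text d fI a i with
         | none => none
         | some (chunk, j) => mergeLoopB sd text fO j (dInit ++ [d]) (aInit ++ [chunk])) := by
  intro N
  induction N with
  | zero =>
    intro i hN fI fO hfI hfO d a dInit aInit
    have hi : ¬ i < sd.length := by omega
    have hr : PySem.List.pyRange (i : Int) (sd.length : Int) = [] := by
      rw [PySem.List.pyRange_one]
      have : ((sd.length : Int) - (i : Int)).toNat = 0 := by omega
      rw [this]; rfl
    rw [hr]
    cases fI with
    | zero =>
      cases fO with
      | zero => rfl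
      | succ fO' => simp only [mergeRunB, mergeLoopB, hi, dif_neg, not_false_iff]; rfl
    | succ fI' =>
      cases fO with
      | zero => simp only [mergeRunB, hi, dif_neg, not_false_iff]; rfl
      | succ fO' => simp only [mergeRunB, mergeLoopB, hi, dif_neg, not_false_iff]; rfl
  | succ N ih =>
    intro i hN fI fO hfI hfO d a dInit aInit
    by_cases hi : i < sd.length
    · have hit : i < text.length := by omega
      have hgetT : PySem.List.pyGet? text (i : Int) = some text[i] := by
        rw [PySem.List.pyGet?_natCast]
        exact List.getElem?_eq_getElem hit
      have hgetS : PySem.List.pyGet? sd (i : Int) = some sd[i] := by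
        rw [PySem.List.pyGet?_natCast]
        exact List.getElem?_eq_getElem hi
      have hr : PySem.List.pyRange (i : Int) (sd.length : Int) =
          (i : Int) :: PySem.List.pyRange ((i + 1 : Nat) : Int) (sd.length : Int) := by
        have h1 : (i : Int) < (sd.length : Int) := by omega
        rw [PySem.List.pyRange_one_cons h1]
        norm_num
      rw [hr, List.foldl_cons]
      obtain ⟨fI', rfl⟩ : ∃ fI', fI = fI' + 1 := ⟨fI - 1, by omega⟩
      obtain ⟨fO', rfl⟩ : ∃ fO', fO = fO' + 1 := ⟨fO - 1, by omega⟩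
      by_cases hd : sd[i] = d
      · -- same date: A extends the last article entry; B's inner while consumes it
        have hstep : mergeStepA sd text (some (dInit ++ [d], aInit ++ [a])) (i : Int) =
            some (dInit ++ [d], aInit ++ [a ++ text[i]]) := by
          simp only [mergeStepA, hgetS, hgetT, getLastD_concat, hd, if_pos,
            List.dropLast_concat]
        rw [hstep, ih (i + 1) (by omega) fI' (fO' + 1) (by omega) (by omega) d (a ++ text[i])]
        simp only [mergeRunB, hi, dif_pos, hd, if_pos, hgetT]
      · -- new date: A opens a new pair; B's inner while stops and the outer loop restarts
        have hstep : mergeStepA sd text (some (dInit ++ [d], aInit ++ [a])) (i : Int) =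
            some ((dInit ++ [d]) ++ [sd[i]], (aInit ++ [a]) ++ [text[i]]) := by
          simp only [mergeStepA, hgetS, hgetT, getLastD_concat, hd, if_neg, not_false_iff]
        rw [hstep,
          ih (i + 1) (by omega) sd.length fO' (by omega) (by omega) sd[i] text[i]
            (dInit ++ [d]) (aInit ++ [a])]
        have hrun : mergeRunB sd text d (fI' + 1) a i = some (a, i) := by
          simp only [mergeRunB, hi, dif_pos, hd, if_neg, not_false_iff]
        rw [hrun]
        simp only [mergeLoopB, hi, dif_pos, hgetT]
    · -- i has reached the end: the remaining range is empty and both loops exit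
      have hr : PySem.List.pyRange (i : Int) (sd.length : Int) = [] := by
        rw [PySem.List.pyRange_one]
        have : ((sd.length : Int) - (i : Int)).toNat = 0 := by omega
        rw [this]; rfl
      rw [hr]
      cases fI with
      | zero =>
        cases fO with
        | zero => rfl
        | succ fO' => simp only [mergeRunB, mergeLoopB, hi, dif_neg, not_false_iff]; rfl
      | succ fI' =>
        cases fO with
        | zero => simp only [mergeRunB, hi, dif_neg, not_false_iff]; rfl
        | succ fO' => simp only [mergeRunB, mergeLoopB, hi, dif_neg, not_false_iff]; rfl

theorem merge_news_spec : Claim_equal_merge_news := by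
  unfold Claim_equal_merge_news
  intro sd text _ hpre
  obtain ⟨hne, hlen⟩ := hpre
  unfold Spec_merge_news
  obtain ⟨d0, sd', rfl⟩ : ∃ d0 sd', sd = d0 :: sd' := by
    cases sd with
    | nil => exact absurd rfl hne
    | cons x xs => exact ⟨x, xs, rfl⟩
  obtain ⟨t0, text', rfl⟩ : ∃ t0 text', text = t0 :: text' := by
    cases text with
    | nil => simp at hlen
    | cons x xs => exact ⟨x, xs, rfl⟩
  have hget0 : PySem.List.pyGet? (t0 :: text') ((0 : Nat) : Int) = some t0 := by
    rw [PySem.List.pyGet?_natCast]; rfl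
  have hA := loopA_eq_loopB (d0 :: sd') (t0 :: text') hlen
      ((d0 :: sd').length) 1 (by omega) (d0 :: sd').length sd'.length (by omega)
      (by simp) d0 t0 [] []
  simp only [List.nil_append] at hA
  have hcast : ((1 : Nat) : Int) = (1 : Int) := by norm_num
  rw [hcast] at hA
  have hB : mergeLoopB (d0 :: sd') (t0 :: text') (sd'.length + 1) 0 [] [] =
      (PySem.List.pyRange 1 (((sd'.length + 1 : Nat)) : Int)).foldl
        (mergeStepA (d0 :: sd') (t0 :: text')) (some ([d0], [t0])) := by
    simp only [List.length_cons] at hA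
    simp only [mergeLoopB, List.length_cons, hget0, List.nil_append,
      List.getElem_cons_zero]
    rw [hA]
    have hpos : 0 < sd'.length + 1 := Nat.succ_pos _
    simp only [hpos, dif_pos, Nat.zero_add]
  unfold merge_news merge_news_alt
  simp only [PySem.List.pyGet?_zero_cons, List.length_cons, hB]
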